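-- pv_equiv track=rewrite | github.com/Omega97/mancala | misc.py | special_iter
-- ===== SOURCE A (Python) =====
-- def special_iter(player, index, n, size):
--     """"""
--     assert player in (0, 1)
--     t_skip = (True, player, index)
--     on_board = True
--     for _ in range(n):
--         if not on_board:
--             on_board = True
--             player = 1 - player
--         else:
--             index += 1
--             if index >= size:
--                 index = 0
--                 on_board = False
--         out = (on_board, player, index)
--         if out != t_skip:
--             yield out
-- ===== SOURCE B (Python) =====
-- def special_iter(player, index, n, size):
--     assert player in (0, 1)
--     skip = (True, player, index)
--     other = 1 - player
--     m = max(size, 1)          # cells visited per side (>=1 even for degenerate boards)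
--     period = 2 * m + 2        # full traversal cycle: two sides + two stores
--     run = max(size - 1 - index, 0)  # plain increments before the first wrap
--     for k in range(n):
--         if k < run:
--             out = (True, player, index + 1 + k)
--         else:
--             r = (k - run) % period
--             if r == 0:
--                 out = (False, player, 0)
--             elif r <= m:
--                 out = (True, other, r - 1)
--             elif r == m + 1:
--                 out = (False, other, 0)
--             else:
--                 out = (True, player, r - m - 2)
--         if out != skip:
--             yield out
-- ===== Notes on version B (the rewrite author's own statement) =====
-- stated objective: alternative
-- what changed: Replaces A's step-by-step mutation of (on_board, player, index) with a closed-form formula: the k-th sown position is computed directly as an arithmetic pre-wrap run followed by (k - run) mod cycle-length on the fixed traversal cycle.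
import Mathlib
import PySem

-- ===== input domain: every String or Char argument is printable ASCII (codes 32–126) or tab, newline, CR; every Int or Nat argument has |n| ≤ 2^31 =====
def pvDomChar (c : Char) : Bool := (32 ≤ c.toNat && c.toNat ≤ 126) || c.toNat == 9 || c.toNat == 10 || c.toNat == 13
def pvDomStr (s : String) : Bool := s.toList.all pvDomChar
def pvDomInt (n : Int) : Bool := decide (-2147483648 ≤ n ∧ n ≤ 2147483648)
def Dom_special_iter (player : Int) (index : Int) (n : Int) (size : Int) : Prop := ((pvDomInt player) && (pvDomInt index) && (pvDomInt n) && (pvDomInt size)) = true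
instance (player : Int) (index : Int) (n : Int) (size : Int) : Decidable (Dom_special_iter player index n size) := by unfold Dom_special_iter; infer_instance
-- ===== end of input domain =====

-- B replaces A's step-by-step state mutation by a closed-form formula for the k-th sown
-- position (a pre-wrap arithmetic run, then position (k - run) mod cycle-length on the fixed
-- traversal cycle); equivalence is about the returned sequence of yielded tuples.

-- ===== PORT A =====
-- loop body of A's for-loop; state s = (on_board, player, index), branches in A's order
def stepA (size : Int) (s : Bool × Int × Int) : Bool × Int × Int :=
  if !s.1 then
    (true, 1 - s.2.1, s.2.2)
  else
    let index := s.2.2 + 1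
    if index ≥ size then (false, s.2.1, 0) else (true, s.2.1, index)

-- 'for _ in range(n)' with the yields collected in order
def aLoop (size : Int) (skip : Bool × Int × Int) : Nat → (Bool × Int × Int) → List (Bool × Int × Int)
  | 0, _ => []
  | m + 1, s =>
    let out := stepA size s
    (if out ≠ skip then [out] else []) ++ aLoop size skip m out

def special_iter (player : Int) (index : Int) (n : Int) (size : Int) : List (Bool × Int × Int) :=
  aLoop size (true, player, index) n.toNat (true, player, index)

-- ===== PORT B =====
-- B's closed form for the k-th position (Source B's loop body before the skip filter)
def cellB (player other m run index : Int) (k : Int) : Bool × Int × Int :=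
  if k < run then (true, player, index + 1 + k)
  else
    let r := PySem.Int.mod (k - run) (2 * m + 2)
    if r = 0 then (false, player, 0)
    else if r ≤ m then (true, other, r - 1)
    else if r = m + 1 then (false, other, 0)
    else (true, player, r - m - 2)

def special_iter_alt (player : Int) (index : Int) (n : Int) (size : Int) : List (Bool × Int × Int) :=
  let skip := (true, player, index)
  let other := 1 - player
  let m := max size 1
  let run := max (size - 1 - index) 0
  (PySem.List.pyRange 0 n 1).filterMap (fun k =>
    let out := cellB player other m run index k
    if out ≠ skip then some out else none)

-- ===== PRECONDITION & SPEC =====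
-- Pre_ excludes exactly the inputs where A's 'assert player in (0, 1)' raises AssertionError.
def Pre_special_iter (player : Int) (index : Int) (n : Int) (size : Int) : Prop :=
  player = 0 ∨ player = 1
instance (player : Int) (index : Int) (n : Int) (size : Int) : Decidable (Pre_special_iter player index n size) := by unfold Pre_special_iter; infer_instance
def pvWitness_special_iter : Int × Int × Int × Int := (0, 2, 6, 4)

def Spec_special_iter (player : Int) (index : Int) (n : Int) (size : Int) (out : List (Bool × Int × Int)) : Prop := out = special_iter_alt player index n size
instance (player : Int) (index : Int) (n : Int) (size : Int) (out : List (Bool × Int × Int)) : Decidable (Spec_special_iter player index n size out) := by unfold Spec_special_iter; infer_instance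

-- ===== CLAIM (what is proved, stated in full; the proofs are below) =====
def Claim_equal_special_iter : Prop := ∀ (player : Int) (index : Int) (n : Int) (size : Int), Dom_special_iter player index n size → Pre_special_iter player index n size → Spec_special_iter player index n size (special_iter player index n size)

-- ===== LEMMAS AND PROOFS =====

-- A's loop yields the filtered trace of iterated steps
lemma aLoop_eq_trace (size : Int) (skip : Bool × Int × Int) (m : Nat) (s : Bool × Int × Int) :
    aLoop size skip m s
      = ((List.range m).map (fun k => (stepA size)^[k + 1] s)).filter (fun o => o ≠ skip) := by
  induction m generalizing s with
  | zero => simp [aLoop]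
  | succ m ih =>
    rw [List.range_succ_eq_map]
    simp only [aLoop, List.map_cons, List.map_map, List.filter_cons]
    rw [ih (stepA size s)]
    have hshift : ∀ k : Nat, (stepA size)^[k + 1 + 1] s = (stepA size)^[k + 1] (stepA size s) := by
      intro k
      rw [Function.iterate_succ_apply]
    by_cases h : stepA size s = skip
    · simp [h, Function.comp_def]
    · simp [h, Function.comp_def]

-- plain increments: while the index stays below size - 1
lemma iter_inc (size p i : Int) (j : Nat) (h : (j : Int) ≤ size - 1 - i) :
    (stepA size)^[j] (true, p, i) = (true, p, i + j) := by
  induction j with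
  | zero => simp
  | succ j ih =>
    rw [Function.iterate_succ_apply', ih (by push_cast at h ⊢; omega)]
    simp only [stepA, Bool.not_true]
    rw [if_neg (by simp), if_neg (by push_cast at h ⊢; omega)]
    push_cast
    ring_nf

-- the canonical cycle position (B's else-branch as a function of the Nat residue)
def cellC (p : Int) (mN : Nat) (r : Nat) : Bool × Int × Int :=
  if r = 0 then (false, p, 0)
  else if r ≤ mN then (true, 1 - p, (r : Int) - 1)
  else if r = mN + 1 then (false, 1 - p, 0)
  else (true, p, (r : Int) - mN - 2)

lemma inc0 (size p : Int) (mN : Nat) (hm : (mN : Int) = max size 1) (j : Nat) (h : j ≤ mN - 1) :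
    (stepA size)^[j] (true, p, 0) = (true, p, (j : Int)) := by
  rcases Nat.eq_zero_or_pos j with hj | hj
  · simp [hj]
  · have := iter_inc size p 0 j (by
      have hmax := le_max_left size 1
      have hmax1 := le_max_right size 1
      omega)
    simpa using this

lemma side (size p : Int) (mN : Nat) (hm : (mN : Int) = max size 1) (r : Nat)
    (h1 : 1 ≤ r) (h2 : r ≤ mN) :
    (stepA size)^[r] (false, p, 0) = (true, 1 - p, (r : Int) - 1) := by
  obtain ⟨r', rfl⟩ : ∃ r', r = r' + 1 := ⟨r - 1, by omega⟩
  rw [Function.iterate_succ_apply]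
  have hstep : stepA size (false, p, 0) = (true, 1 - p, 0) := by simp [stepA]
  rw [hstep, inc0 size (1 - p) mN hm r' (by omega)]
  push_cast
  ring_nf

lemma half (size p : Int) (mN : Nat) (hm : (mN : Int) = max size 1) :
    (stepA size)^[mN + 1] (false, p, 0) = (false, 1 - p, 0) := by
  have hm1 : 1 ≤ mN := by have := le_max_right size 1; omega
  rw [Function.iterate_succ_apply', side size p mN hm mN hm1 le_rfl]
  simp only [stepA, Bool.not_true]
  rw [if_neg (by simp), if_pos (by have := le_max_left size 1; omega)]

lemma period_iter (size p : Int) (mN : Nat) (hm : (mN : Int) = max size 1) :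
    (stepA size)^[2 * mN + 2] (false, p, 0) = (false, p, 0) := by
  have : 2 * mN + 2 = (mN + 1) + (mN + 1) := by omega
  rw [this, Function.iterate_add_apply, half size p mN hm,
      half size (1 - p) mN hm]
  norm_num

lemma iter_small (size p : Int) (mN : Nat) (hm : (mN : Int) = max size 1) (r : Nat)
    (hr : r < 2 * mN + 2) :
    (stepA size)^[r] (false, p, 0) = cellC p mN r := by
  have hm1 : 1 ≤ mN := by have := le_max_right size 1; omega
  rcases Nat.eq_zero_or_pos r with h0 | h0
  · simp [h0, cellC]
  by_cases hle : r ≤ mN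
  · rw [side size p mN hm r h0 hle, cellC, if_neg (by omega), if_pos hle]
  by_cases heq : r = mN + 1
  · rw [heq, half size p mN hm, cellC, if_neg (by omega), if_neg (by omega), if_pos rfl]
  · obtain ⟨r', hr'⟩ : ∃ r', r = r' + (mN + 1) := ⟨r - (mN + 1), by omega⟩
    rw [hr', Function.iterate_add_apply, half size p mN hm,
        side size (1 - p) mN hm r' (by omega) (by omega)]
    rw [cellC, if_neg (by omega), if_neg (by omega), if_neg (by omega)]
    simp only [Prod.mk.injEq, true_and, sub_sub_cancel]
    push_cast
    omega

lemma iter_mul (size p : Int) (mN : Nat) (hm : (mN : Int) = max size 1) (q j : Nat) :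
    (stepA size)^[q * (2 * mN + 2) + j] (false, p, 0) = (stepA size)^[j] (false, p, 0) := by
  induction q with
  | zero => simp
  | succ q ih =>
    have : (q + 1) * (2 * mN + 2) + j = (q * (2 * mN + 2) + j) + (2 * mN + 2) := by ring
    rw [this, Function.iterate_add_apply, period_iter size p mN hm, ih]

lemma iter_mod (size p : Int) (mN : Nat) (hm : (mN : Int) = max size 1) (j : Nat) :
    (stepA size)^[j] (false, p, 0) = cellC p mN (j % (2 * mN + 2)) := by
  have hP : 0 < 2 * mN + 2 := by omega
  have hsplit : j = (j / (2 * mN + 2)) * (2 * mN + 2) + j % (2 * mN + 2) := by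
    rw [Nat.mul_comm]; exact (Nat.div_add_mod j _).symm
  conv_lhs => rw [hsplit]
  rw [iter_mul size p mN hm, iter_small size p mN hm _ (Nat.mod_lt _ hP)]

-- core: B's closed form computes A's (k+1)-st state
lemma cell_eq (size p i : Int) (k : Nat) :
    cellB p (1 - p) (max size 1) (max (size - 1 - i) 0) i (k : Int)
      = (stepA size)^[k + 1] (true, p, i) := by
  set run : Int := max (size - 1 - i) 0 with hrun
  have hrun0 : 0 ≤ run := le_max_right _ _
  have hrunge : size - 1 - i ≤ run := le_max_left _ _
  set runN : Nat := run.toNat with hrunN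
  have hcast : (runN : Int) = run := Int.toNat_of_nonneg hrun0
  by_cases hk : (k : Int) < run
  · -- inside the plain increment run
    have hkr : run = size - 1 - i := by
      rcases max_cases (size - 1 - i) 0 with ⟨h1, _⟩ | ⟨h1, h2⟩ <;> omega
    rw [cellB, if_pos hk, iter_inc size p i (k + 1) (by push_cast; omega)]
    simp only [Prod.mk.injEq, true_and]
    push_cast
    ring
  · -- past the wrap: on the cycle
    set mN : Nat := (max size 1).toNat with hmN
    have hmcast : (mN : Int) = max size 1 := Int.toNat_of_nonneg (by have := le_max_right size 1; omega)
    have hkrun : runN ≤ k := by omega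
    have hsplit : k + 1 = ((k - runN) + 1) + runN := by omega
    rw [hsplit, Function.iterate_add_apply]
    have h0 : (stepA size)^[runN] (true, p, i) = (true, p, i + runN) := by
      rcases Nat.eq_zero_or_pos runN with h | h
      · simp [h]
      · exact iter_inc size p i runN (by
          have : run = size - 1 - i := by
            rcases max_cases (size - 1 - i) 0 with ⟨h1, _⟩ | ⟨h1, h2⟩ <;> omega
          omega)
    rw [h0, Function.iterate_succ_apply]
    have h1 : stepA size (true, p, i + (runN : Int)) = (false, p, 0) := by
      simp only [stepA, Bool.not_true]
      rw [if_neg (by simp), if_pos (by omega)]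
    rw [h1, iter_mod size p mN hmcast]
    -- match B's residue arithmetic with the Nat residue
    have hdiff : (k : Int) - run = ((k - runN : Nat) : Int) := by push_cast; omega
    rw [cellB, if_neg hk, ← hmcast, hdiff]
    have hper : 2 * (mN : Int) + 2 = ((2 * mN + 2 : Nat) : Int) := by push_cast; ring
    rw [hper, PySem.Int.mod_natCast]
    set rN : Nat := (k - runN) % (2 * mN + 2) with hrN
    have hrlt : rN < 2 * mN + 2 := Nat.mod_lt _ (by omega)
    rw [cellC]
    by_cases hz : rN = 0
    · rw [if_pos (by exact_mod_cast congrArg (Nat.cast : Nat → Int) hz), if_pos hz]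
    · rw [if_neg (by exact_mod_cast fun h => hz (by exact_mod_cast h)), if_neg hz]
      by_cases hle : rN ≤ mN
      · rw [if_pos (by exact_mod_cast hle), if_pos hle]
      · rw [if_neg (by exact_mod_cast hle), if_neg hle]
        by_cases he : rN = mN + 1
        · rw [if_pos (by exact_mod_cast he), if_pos he]
        · rw [if_neg (by exact_mod_cast fun h => he (by exact_mod_cast h)), if_neg he]

lemma filterMap_if_eq_filter {α : Type} (f : α → Bool × Int × Int) (skip : Bool × Int × Int)
    (l : List α) :
    l.filterMap (fun k => if f k ≠ skip then some (f k) else none)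
      = (l.map f).filter (fun o => o ≠ skip) := by
  induction l with
  | nil => rfl
  | cons a l ih =>
    simp only [List.filterMap_cons, List.map_cons, List.filter_cons, ih]
    by_cases h : f a = skip
    · simp [h]
    · simp [h]

lemma main_eq (player index n size : Int) :
    special_iter player index n size = special_iter_alt player index n size := by
  have halt : special_iter_alt player index n size
      = ((List.range n.toNat).map (fun k : Nat =>
          cellB player (1 - player) (max size 1) (max (size - 1 - index) 0) index (k : Int))).filter
          (fun o => o ≠ (true, player, index)) := by
    simp only [special_iter_alt]
    rw [filterMap_if_eq_filter
        (fun k : Int => cellB player (1 - player) (max size 1) (max (size - 1 - index) 0) index k)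
        (true, player, index), PySem.List.pyRange_one, List.map_map]
    simp [Function.comp_def]
  rw [special_iter, aLoop_eq_trace, halt]
  congr 1
  exact (List.map_congr_left (fun k _ => cell_eq size player index k)).symm

-- ===== VERDICT (by name: the statement is the Claim_ definition above) =====
theorem special_iter_spec : Claim_equal_special_iter := by
  intro player index n size _ _
  unfold Spec_special_iter
  exact main_eq player index n size
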